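-- pv_equiv track=rewrite | github.com/perplexabot/coogdlea | leetcode/check_if_string_is_prefix.py | isPrefixString
-- ===== SOURCE A (Python) =====
-- def isPrefixString(s: str, words: list[str]) -> bool:
--     clen = 0
--     curr = []
--     for word in words + ['']:
--         if clen < len(s):
--             curr += word
--             clen += len(word)
--         elif clen == len(s):
--             return s == ''.join(curr)
--         else:
--             return False
-- ===== SOURCE B (Python) =====
-- def isPrefixString(s: str, words: list[str]) -> bool:
--     i = 0
--     n = len(s)
--     for word in words:
--         if i == n:
--             return True
--         if s[i:i + len(word)] != word:
--             return False
--         i += len(word)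
--     return i == n
-- ===== Notes on version B (the rewrite author's own statement) =====
-- stated objective: simpler
-- what changed: B matches each word in place against its slice of s with a running index and never builds the concatenated character list A accumulates, returning False at the first mismatching word instead of comparing the full join at the end.
-- outside the precondition, e.g. on isPrefixString('abc', ['a']): A returns None, B returns False
import Mathlib
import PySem

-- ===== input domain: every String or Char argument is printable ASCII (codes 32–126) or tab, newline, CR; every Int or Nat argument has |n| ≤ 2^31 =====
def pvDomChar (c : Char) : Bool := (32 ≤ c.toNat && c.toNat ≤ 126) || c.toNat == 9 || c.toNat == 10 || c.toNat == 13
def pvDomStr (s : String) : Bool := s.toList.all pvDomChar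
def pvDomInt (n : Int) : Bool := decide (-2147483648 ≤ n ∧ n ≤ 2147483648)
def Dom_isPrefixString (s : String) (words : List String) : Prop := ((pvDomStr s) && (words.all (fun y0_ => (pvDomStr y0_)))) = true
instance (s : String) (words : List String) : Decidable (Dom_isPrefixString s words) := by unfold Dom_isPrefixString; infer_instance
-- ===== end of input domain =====

-- B checks each word in place against its slice of s with a running index, never building
-- the concatenation A accumulates (objective: simpler; return value only).

-- ===== PORT A =====
-- A's loop over words + ['']: accumulate curr (chars) and clen; when clen reaches len(s)
-- compare the join; overshoot returns False.  The [] case is Python's fall-off-the-loop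
-- (returns None there, excluded by Pre_); the port returns false on it.
def pvAloop (sL : List Char) : List String → Nat → List Char → Bool
  | [], _, _ => false
  | w :: ws, clen, curr =>
    if clen < sL.length then pvAloop sL ws (clen + w.toList.length) (curr ++ w.toList)
    else if clen = sL.length then decide (sL = curr)
    else false

def isPrefixString (s : String) (words : List String) : Bool :=
  pvAloop s.toList (words ++ [""]) 0 []

-- ===== PORT B =====
-- B's loop: index i into s; at the top return True if i == n; else compare s[i:i+len(word)]
-- with word; after the loop return i == n.
def pvBloop (sL : List Char) (n : Nat) : List String → Nat → Bool
  | [], i => decide (i = n)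
  | w :: ws, i =>
    if i = n then true
    else if PySem.List.slice sL (some (i : Int)) (some ((i : Int) + (w.toList.length : Int))) ≠ w.toList then false
    else pvBloop sL n ws (i + w.toList.length)

def isPrefixString_alt (s : String) (words : List String) : Bool :=
  pvBloop s.toList s.toList.length words 0

-- ===== PRECONDITION & SPEC =====
-- Pre_ excludes inputs where the total word length is smaller than len(s) (and s ≠ ''):
-- there A falls off its loop and returns None, not a bool.
def Pre_isPrefixString (s : String) (words : List String) : Prop :=
  s.toList.length ≤ (words.map (fun w => w.toList.length)).sum
instance (s : String) (words : List String) : Decidable (Pre_isPrefixString s words) := by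
  unfold Pre_isPrefixString; infer_instance

def pvWitness_isPrefixString : String × List String := ("ab", ["a", "b"])

def Spec_isPrefixString (s : String) (words : List String) (out : Bool) : Prop := out = isPrefixString_alt s words
instance (s : String) (words : List String) (out : Bool) : Decidable (Spec_isPrefixString s words out) := by unfold Spec_isPrefixString; infer_instance

-- ===== CLAIM (what is proved, stated in full; the proofs are below) =====
def Claim_equal_isPrefixString : Prop := ∀ (s : String) (words : List String), Dom_isPrefixString s words → Pre_isPrefixString s words → Spec_isPrefixString s words (isPrefixString s words)

-- ===== LEMMAS AND PROOFS =====

-- Once curr is not a prefix of sL, A can only end in False (either overshoot, or the final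
-- join comparison fails), no matter which words remain.
lemma pvAloop_false (sL : List Char) (ws : List String) (curr : List Char)
    (h : ¬ curr <+: sL) : pvAloop sL (ws ++ [""]) curr.length curr = false := by
  induction ws generalizing curr with
  | nil =>
    simp only [List.nil_append, pvAloop]
    split
    · simp
    · split
      · rename_i heq
        simp only [decide_eq_false_iff_not]
        intro hs; exact h (hs ▸ List.prefix_refl curr)
      · rfl
  | cons w ws ih =>
    simp only [List.cons_append, pvAloop]
    split
    · have h' : ¬ (curr ++ w.toList) <+: sL := fun hp => h ((List.prefix_append curr w.toList).trans hp)
      have := ih (curr ++ w.toList) h'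
      simpa [List.length_append] using this
    · split
      · simp only [decide_eq_false_iff_not]
        intro hs; exact h (hs ▸ List.prefix_refl curr)
      · rfl

-- Main invariant: while the processed words exactly cover sL.take i, A's loop (state i,
-- sL.take i) and B's loop (state i) agree, provided the remaining words suffice to reach
-- len(sL) (Pre_) and i ≤ len(sL).
lemma pvLoop_agree (sL : List Char) (ws : List String) (i : Nat)
    (hpre : sL.length ≤ i + (ws.map (fun w => w.toList.length)).sum)
    (hi : i ≤ sL.length) :
    pvAloop sL (ws ++ [""]) i (sL.take i) = pvBloop sL sL.length ws i := by
  induction ws generalizing i with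
  | nil =>
    have : i = sL.length := le_antisymm hi (by simpa using hpre)
    subst this
    simp [pvAloop, pvBloop, List.take_length]
  | cons w ws ih =>
    by_cases hin : i = sL.length
    · subst hin
      simp [pvAloop, pvBloop, List.take_length]
    · have hlt : i < sL.length := lt_of_le_of_ne hi hin
      rw [List.cons_append]
      simp only [pvAloop, pvBloop, if_pos hlt, if_neg hin]
      by_cases hs : PySem.List.slice sL (some (i : Int)) (some ((i : Int) + (w.toList.length : Int))) = w.toList
      · -- the slice matches: both loops advance by len(word)
        rw [if_neg (by simpa using hs)]
        have hslice : (sL.drop i).take w.toList.length = w.toList := by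
          rw [← PySem.List.slice_natCast_add]; exact hs
        have hlen : i + w.toList.length ≤ sL.length := by
          have := congrArg List.length hslice
          simp only [List.length_take, List.length_drop] at this
          omega
        have htake : sL.take i ++ w.toList = sL.take (i + w.toList.length) := by
          rw [List.take_add, hslice]
        have hcl : (sL.take i).length = i := by simp [hi]
        calc pvAloop sL (ws ++ [""]) (i + w.toList.length) (sL.take i ++ w.toList)
            = pvAloop sL (ws ++ [""]) (i + w.toList.length) (sL.take (i + w.toList.length)) := by
              rw [htake]
          _ = pvBloop sL sL.length ws (i + w.toList.length) := by
              apply ih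
              · simp only [List.map_cons, List.sum_cons] at hpre; omega
              · exact hlen
      · -- the slice mismatches: B returns False; A's curr stops being a prefix, so A ends False
        rw [if_pos (by simpa using hs)]
        have hnp : ¬ (sL.take i ++ w.toList) <+: sL := by
          intro hp
          apply hs
          rw [PySem.List.slice_natCast_add]
          have : w.toList <+: sL.drop i := by
            have h2 : sL.take i ++ w.toList <+: sL.take i ++ sL.drop i := by
              simpa [List.take_append_drop] using hp
            exact (List.prefix_append_right_inj (sL.take i)).mp h2
          exact (List.prefix_iff_eq_take.mp this).symm
        have := pvAloop_false sL ws (sL.take i ++ w.toList) hnp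
        simpa [List.length_append, List.length_take, Nat.min_eq_left hi] using this

-- ===== VERDICT (by name: the statement is the Claim_ definition above) =====
theorem isPrefixString_spec : Claim_equal_isPrefixString := by
  intro s words _dom hpre
  unfold Spec_isPrefixString isPrefixString isPrefixString_alt
  have := pvLoop_agree s.toList words 0 (by simpa using hpre) (Nat.zero_le _)
  simpa using this
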